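-- pv_equiv track=rewrite | github.com/leizhenchun/gmm-resnet | asvspoof21/model/as_gmm.py | gmm_index_trans
-- ===== SOURCE A (Python) =====
-- def gmm_index_trans(number):
--     data = []
--     for i in range(number):
--         data.append([i, ])
--
--     # combine
--     while len(data) > 1:
--         data_len = len(data)
--         for i in range(data_len // 2):
--             data[i].extend(data[i + data_len // 2])
--         data[data_len // 2:] = []
--
--     return data[0]
-- ===== SOURCE B (Python) =====
-- def gmm_index_trans(number):
--     # Collect the successive half-sizes, then expand [0] back-to-front:
--     # each round doubles the index list by interleaving j -> j, j+h.
--     halves = []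
--     m = number
--     while m > 1:
--         halves.append(m // 2)
--         m //= 2
--     res = [0]
--     for h in reversed(halves):
--         res = [x for j in res for x in (j, j + h)]
--     return res
-- ===== Notes on version B (the rewrite author's own statement) =====
-- stated objective: faster
-- what changed: Instead of materialising n singleton lists and repeatedly merging/truncating them in place (copying ~n elements per round), B records the successive half-sizes and expands the index list [0] back-to-front by interleaving j -> (j, j+h), never touching per-index lists.
-- outside the precondition, e.g. on gmm_index_trans(0): A raises IndexError, B returns [0]
import Mathlib
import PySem

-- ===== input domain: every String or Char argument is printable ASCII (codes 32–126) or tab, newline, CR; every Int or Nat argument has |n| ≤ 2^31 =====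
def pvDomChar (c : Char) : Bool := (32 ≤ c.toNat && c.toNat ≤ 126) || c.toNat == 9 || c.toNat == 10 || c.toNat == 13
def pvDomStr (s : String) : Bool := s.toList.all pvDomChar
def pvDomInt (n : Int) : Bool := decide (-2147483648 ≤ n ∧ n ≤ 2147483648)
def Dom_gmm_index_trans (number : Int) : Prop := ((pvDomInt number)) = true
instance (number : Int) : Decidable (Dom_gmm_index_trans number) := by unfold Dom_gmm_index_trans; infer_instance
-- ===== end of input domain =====

-- B replaces A's in-place half-merging of n growing lists by a back-to-front
-- interleaving expansion of the index list [0]; objective: faster.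

-- ===== PORT A =====
-- length preservation of the inner fold (cited by pvALoop's decreasing_by)
theorem pvSetFold_length (off : Nat) (l : List Nat) :
    ∀ (data : List (List Int)),
      (l.foldl (fun d i => d.set i ((d.getD i []) ++ (d.getD (i + off) []))) data).length
        = data.length := by
  induction l with
  | nil => intro data; rfl
  | cons x xs ih => intro data; simp only [List.foldl_cons]; rw [ih]; simp

-- inner 'for i in range(data_len // 2): data[i].extend(data[i + data_len // 2])'
def pvAInner (data : List (List Int)) (h : Nat) : List (List Int) :=
  (List.range h).foldl
    (fun d i => d.set i ((d.getD i []) ++ (d.getD (i + h) []))) data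

theorem pvAInner_length (data : List (List Int)) (h : Nat) :
    (pvAInner data h).length = data.length :=
  pvSetFold_length h (List.range h) data

-- the 'while len(data) > 1' loop; 'data[data_len//2:] = []' keeps the first half
def pvALoop (data : List (List Int)) : List (List Int) :=
  if h : 1 < data.length then
    pvALoop ((pvAInner data (data.length / 2)).take (data.length / 2))
  else data
termination_by data.length
decreasing_by
  simp only [List.length_take, pvAInner_length]
  omega

def gmm_index_trans (number : Int) : List Int :=
  (PySem.List.pyGet?
    (pvALoop ((PySem.List.pyRange 0 number 1).map (fun i => [i]))) 0).getD []

-- ===== PORT B =====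
-- the 'while m > 1: halves.append(m // 2); m //= 2' loop
def pvBHalves (m : Int) : List Int :=
  if h : 1 < m then PySem.Int.floordiv m 2 :: pvBHalves (PySem.Int.floordiv m 2) else []
termination_by m.toNat
decreasing_by
  rw [PySem.Int.floordiv_eq_ediv_of_pos (by norm_num)]
  omega

-- 'res = [x for j in res for x in (j, j + h)]' over reversed(halves)
def gmm_index_trans_alt (number : Int) : List Int :=
  (pvBHalves number).reverse.foldl
    (fun res h => res.flatMap (fun j => [j, j + h])) [0]

-- ===== PRECONDITION & SPEC =====
-- Pre_ excludes exactly number ≤ 0, where A raises IndexError on data[0] (data is empty).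
def Pre_gmm_index_trans (number : Int) : Prop := 1 ≤ number
instance (number : Int) : Decidable (Pre_gmm_index_trans number) := by
  unfold Pre_gmm_index_trans; infer_instance
def pvWitness_gmm_index_trans : Int := (6)

def Spec_gmm_index_trans (number : Int) (out : List Int) : Prop := out = gmm_index_trans_alt number
instance (number : Int) (out : List Int) : Decidable (Spec_gmm_index_trans number out) := by unfold Spec_gmm_index_trans; infer_instance

-- ===== CLAIM (what is proved, stated in full; the proofs are below) =====
def Claim_equal_gmm_index_trans : Prop := ∀ (number : Int), Dom_gmm_index_trans number → Pre_gmm_index_trans number → Spec_gmm_index_trans number (gmm_index_trans number)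

-- ===== LEMMAS AND PROOFS =====

theorem flatMap_congr_mem {α β : Type} (l : List α) (f g : α → List β)
    (h : ∀ x ∈ l, f x = g x) : l.flatMap f = l.flatMap g := by
  simp only [List.flatMap_def]
  rw [List.map_congr_left h]

-- semantic model: the final index list, by the interleaving recursion
def pvF (m : Nat) : List Int :=
  if h : m ≤ 1 then [0]
  else (pvF (m / 2)).flatMap (fun j => [j, j + ((m / 2 : Nat) : Int)])
termination_by m
decreasing_by omega

theorem pvF_mem_bounds (m : Nat) : 1 ≤ m → ∀ j ∈ pvF m, 0 ≤ j ∧ j < (m : Int) := by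
  induction m using Nat.strong_induction_on with
  | _ m ih =>
    intro hm j hj
    rw [pvF] at hj
    split at hj
    · next h1 =>
      simp only [List.mem_singleton] at hj
      subst hj
      constructor <;> [norm_num; exact_mod_cast hm]
    · next h1 =>
      simp only [List.mem_flatMap] at hj
      obtain ⟨a, ha, hja⟩ := hj
      have hb := ih (m / 2) (by omega) (by omega) a ha
      simp only [List.mem_cons, List.mem_singleton, List.not_mem_nil, or_false] at hja
      rcases hja with h | h <;> subst h <;> omega

theorem take_eq_map_getD (l : List (List Int)) (h : Nat) (hh : h ≤ l.length) :
    l.take h = (List.range h).map (fun k => l.getD k []) := by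
  apply List.ext_getElem
  · simp; omega
  · intro i h1 h2
    simp only [List.length_take] at h1
    simp only [List.getElem_take, List.getElem_map, List.getElem_range]
    rw [List.getD_eq_getElem?_getD, List.getElem?_eq_getElem (by omega)]
    rfl

-- the inner fold, read back entrywise
theorem pvAInner_go_getD (off : Nat) (hoff : 1 ≤ off) :
    ∀ (n : Nat) (data : List (List Int)), n ≤ off → off + n ≤ data.length →
    ∀ k, ((List.range n).foldl
      (fun d i => d.set i ((d.getD i []) ++ (d.getD (i + off) []))) data).getD k []
      = if k < n then data.getD k [] ++ data.getD (k + off) [] else data.getD k [] := by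
  intro n
  induction n with
  | zero => intro data _ _ k; simp
  | succ n ih =>
    intro data hn hlen k
    rw [List.range_succ, List.foldl_append]
    simp only [List.foldl_cons, List.foldl_nil]
    set prev := (List.range n).foldl
      (fun d i => d.set i ((d.getD i []) ++ (d.getD (i + off) []))) data with hprev
    have hprevlen : prev.length = data.length := pvSetFold_length off (List.range n) data
    have hget : ∀ k, prev.getD k [] =
        if k < n then data.getD k [] ++ data.getD (k + off) [] else data.getD k [] :=
      ih data (by omega) (by omega)
    have hgn : prev.getD n [] = data.getD n [] := by rw [hget]; simp
    have hgnoff : prev.getD (n + off) [] = data.getD (n + off) [] := by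
      rw [hget]
      exact if_neg (by omega)
    by_cases hk : k = n
    · subst hk
      rw [List.getD_eq_getElem?_getD, List.getElem?_set_self (by omega), hgn, hgnoff]
      rw [if_pos (by omega)]
      rfl
    · rw [List.getD_eq_getElem?_getD, List.getElem?_set_ne (by omega),
        ← List.getD_eq_getElem?_getD, hget]
      rcases Nat.lt_trichotomy k n with h | h | h
      · rw [if_pos h, if_pos (by omega)]
      · exact absurd h hk
      · rw [if_neg (by omega), if_neg (by omega)]

theorem pvAInner_getD (data : List (List Int)) (h : Nat) (hh : 1 ≤ h)
    (hlen : h + h ≤ data.length) (k : Nat) :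
    (pvAInner data h).getD k []
      = if k < h then data.getD k [] ++ data.getD (k + h) [] else data.getD k [] :=
  pvAInner_go_getD h hh h data le_rfl hlen k

theorem pvALoop_model (m : Nat) :
    ∀ (data : List (List Int)), data.length = m → 1 ≤ m →
    (pvALoop data).getD 0 [] = (pvF m).flatMap (fun j => data.getD j.toNat []) := by
  induction m using Nat.strong_induction_on with
  | _ m ih =>
    intro data hm h1
    by_cases hgt : 1 < m
    · have hh : 1 ≤ m / 2 := by omega
      rw [pvALoop, dif_pos (show 1 < data.length by omega), hm]
      set newdata := (pvAInner data (m / 2)).take (m / 2) with hnd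
      have hndeq : newdata = (List.range (m / 2)).map
          (fun k => data.getD k [] ++ data.getD (k + m / 2) []) := by
        rw [hnd, take_eq_map_getD _ _ (by rw [pvAInner_length]; omega)]
        apply List.map_congr_left
        intro k hk
        simp only [List.mem_range] at hk
        rw [pvAInner_getD data (m / 2) hh (by omega), if_pos hk]
      have hndlen : newdata.length = m / 2 := by rw [hndeq]; simp
      have hndget : ∀ k, k < m / 2 → newdata.getD k []
          = data.getD k [] ++ data.getD (k + m / 2) [] := by
        intro k hk
        rw [hndeq, List.getD_eq_getElem?_getD, List.getElem?_map,
          List.getElem?_range hk]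
        rfl
      rw [ih (m / 2) (by omega) newdata hndlen hh]
      conv_rhs => rw [pvF]
      rw [dif_neg (by omega), List.flatMap_assoc]
      simp only [List.flatMap_cons, List.flatMap_nil, List.append_nil]
      apply flatMap_congr_mem
      intro j hj
      have hb := pvF_mem_bounds (m / 2) hh j hj
      rw [hndget j.toNat (by omega)]
      have h2 : (j + ((m / 2 : Nat) : Int)).toNat = j.toNat + m / 2 := by omega
      rw [h2]
    · have hm1 : m = 1 := by omega
      subst hm1
      rw [pvALoop, dif_neg (by omega)]
      rw [pvF, dif_pos (by norm_num)]
      simp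

theorem pvBHalves_fold (n : Nat) :
    ∀ (m : Int), 1 ≤ m → m.toNat = n →
    (pvBHalves m).reverse.foldl (fun res h => res.flatMap (fun j => [j, j + h])) [0]
      = pvF n := by
  induction n using Nat.strong_induction_on with
  | _ n ih =>
    intro m hm hn
    by_cases h1 : 1 < m
    · have hq : PySem.Int.floordiv m 2 = m / 2 :=
        PySem.Int.floordiv_eq_ediv_of_pos (by norm_num)
      rw [pvBHalves, dif_pos h1, hq]
      rw [List.reverse_cons, List.foldl_append]
      rw [ih (n / 2) (by omega) (m / 2) (by omega) (by omega)]
      simp only [List.foldl_cons, List.foldl_nil]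
      conv_rhs => rw [pvF]
      rw [dif_neg (by omega)]
      have hc : (m / 2 : Int) = ((n / 2 : Nat) : Int) := by omega
      rw [hc]
    · have : m = 1 := by omega
      subst this
      rw [pvBHalves, dif_neg (by norm_num)]
      have : n = 1 := by omega
      subst this
      rw [pvF, dif_pos (by norm_num)]
      simp

-- ===== VERDICT (by name: the statement is the Claim_ definition above) =====
theorem gmm_index_trans_spec : Claim_equal_gmm_index_trans := by
  intro number _ hpre
  have hpre' : (1 : Int) ≤ number := hpre
  unfold Spec_gmm_index_trans gmm_index_trans gmm_index_trans_alt
  set data0 := (PySem.List.pyRange 0 number 1).map (fun i => ([i] : List Int)) with hd0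
  have hd0len : data0.length = number.toNat := by
    rw [hd0, List.length_map, PySem.List.length_pyRange_one]
    omega
  have hd0get : ∀ k : Nat, k < number.toNat → data0.getD k [] = [(k : Int)] := by
    intro k hk
    rw [hd0, PySem.List.pyRange_one]
    rw [List.getD_eq_getElem?_getD, List.getElem?_map, List.getElem?_map,
      List.getElem?_range (by omega)]
    simp
  rw [PySem.List.pyGet?_zero, ← List.getD_eq_getElem?_getD]
  rw [pvALoop_model number.toNat data0 hd0len (by omega)]
  rw [pvBHalves_fold number.toNat number hpre' rfl]
  rw [flatMap_congr_mem (pvF number.toNat) _ (fun j => [j]) ?_]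
  · simp
  · intro j hj
    have hb := pvF_mem_bounds number.toNat (by omega) j hj
    rw [hd0get j.toNat (by omega)]
    congr 1
    omega
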